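-- pv_equiv track=rewrite | github.com/JasonWu8512/platform-backend | zero/api/views/buried/buriedDeal.py | _check_event_key
-- ===== SOURCE A (Python) =====
-- def _check_event_key(event_keys, respon):
--     isperformanced = set()
--     for day in respon:
--         for event in day.get('events'):
--             isperformanced.add(event.get('eventKey'))
--     # data = [{'eventKey': _, 'result': '是' if _.get('event_key') in isperformanced else '否'} for _ in event_keys]
--     for eve in event_keys:
--         if eve.get('event_key') in isperformanced:
--             eve['result'] = '是'
--         else:
--             eve['result'] = '否'
--     return event_keys
-- ===== SOURCE B (Python) =====
-- def _check_event_key(event_keys, respon):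
--     def _seen(key):
--         for day in respon:
--             for event in day.get('events'):
--                 if event.get('eventKey') == key:
--                     return True
--         return False
--     for eve in event_keys:
--         eve['result'] = '是' if _seen(eve.get('event_key')) else '否'
--     return event_keys
-- ===== Notes on version B (the rewrite author's own statement) =====
-- stated objective: alternative
-- what changed: Drops A's precomputed set of seen eventKeys: each event_key's result is decided by a short-circuiting helper that scans the nested response directly, and the output is built by explicit recursion over event_keys.
import Mathlib
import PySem

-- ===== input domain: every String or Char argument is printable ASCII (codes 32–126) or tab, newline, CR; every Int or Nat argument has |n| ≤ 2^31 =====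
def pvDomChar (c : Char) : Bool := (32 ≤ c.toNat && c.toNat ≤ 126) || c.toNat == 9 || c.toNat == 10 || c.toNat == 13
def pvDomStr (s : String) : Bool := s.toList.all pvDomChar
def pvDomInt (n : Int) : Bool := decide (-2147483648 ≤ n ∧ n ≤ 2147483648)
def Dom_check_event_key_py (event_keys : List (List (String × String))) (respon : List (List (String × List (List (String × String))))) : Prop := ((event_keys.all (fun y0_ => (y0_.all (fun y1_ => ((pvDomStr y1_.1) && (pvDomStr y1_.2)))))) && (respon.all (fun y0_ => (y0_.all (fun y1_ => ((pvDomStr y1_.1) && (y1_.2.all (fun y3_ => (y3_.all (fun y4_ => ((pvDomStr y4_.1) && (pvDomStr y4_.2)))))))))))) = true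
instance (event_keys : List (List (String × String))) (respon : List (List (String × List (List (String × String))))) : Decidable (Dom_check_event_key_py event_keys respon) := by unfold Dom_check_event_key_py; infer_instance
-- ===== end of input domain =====

-- ===== PORT A =====
-- B replaces A's precomputed set of seen eventKeys by a per-key short-circuiting scan of the response,
-- written as explicit recursion; return-value equivalence only (both Pythons mutate the event_key dicts in place).
def check_event_key_py (event_keys : List (List (String × String))) (respon : List (List (String × List (List (String × String))))) : List (List (String × String)) :=
  -- isperformanced built by the two nested for-loops (day.get('events') is `some` on Pre_; getD [] is unreachable there)
  let isperformanced : PySem.Set (Option String) :=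
    respon.foldl (fun s day =>
      (((PySem.Dict.mk day).get? "events").getD []).foldl
        (fun s event => PySem.Set.add s ((PySem.Dict.mk event).get? "eventKey")) s)
      PySem.Set.empty
  -- the for-loop mutating each eve in place, returning event_keys
  event_keys.map (fun eve =>
    if PySem.Set.contains isperformanced ((PySem.Dict.mk eve).get? "event_key") then
      ((PySem.Dict.mk eve).insert "result" "是").items
    else
      ((PySem.Dict.mk eve).insert "result" "否").items)

-- ===== PORT B =====
-- helper _seen's inner loop: scan one day's events for the key, early return True
def pvSeenInEvents (key : Option String) : List (List (String × String)) → Bool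
  | [] => false
  | event :: rest =>
    if (PySem.Dict.mk event).get? "eventKey" == key then true
    else pvSeenInEvents key rest

-- helper _seen's outer loop over the response days
def pvSeen (key : Option String) : List (List (String × List (List (String × String)))) → Bool
  | [] => false
  | day :: rest =>
    if pvSeenInEvents key (((PySem.Dict.mk day).get? "events").getD []) then true
    else pvSeen key rest

-- the for-loop over event_keys, one output dict per input dict
def pvMark (respon : List (List (String × List (List (String × String))))) : List (List (String × String)) → List (List (String × String))
  | [] => []
  | eve :: rest =>
    ((PySem.Dict.mk eve).insert "result"
        (if pvSeen ((PySem.Dict.mk eve).get? "event_key") respon then "是" else "否")).items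
      :: pvMark respon rest

def check_event_key_py_alt (event_keys : List (List (String × String))) (respon : List (List (String × List (List (String × String))))) : List (List (String × String)) :=
  pvMark respon event_keys

-- ===== PRECONDITION & SPEC =====
-- Pre_ excludes inputs where some response day has no 'events' key: there day.get('events') is None and both A's and B's nested iteration raise TypeError.
def Pre_check_event_key_py (event_keys : List (List (String × String))) (respon : List (List (String × List (List (String × String))))) : Prop :=
  ∀ day ∈ respon, ((PySem.Dict.mk day).get? "events").isSome
instance (event_keys : List (List (String × String))) (respon : List (List (String × List (List (String × String))))) : Decidable (Pre_check_event_key_py event_keys respon) := by unfold Pre_check_event_key_py; infer_instance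
def pvWitness_check_event_key_py : (List (List (String × String))) × (List (List (String × List (List (String × String))))) :=
  ([[("event_key", "k1")], [("event_key", "k9")]],
   [[("events", [[("eventKey", "k1")], [("eventKey", "k2")]])]])
def Spec_check_event_key_py (event_keys : List (List (String × String))) (respon : List (List (String × List (List (String × String))))) (out : List (List (String × String))) : Prop := out = check_event_key_py_alt event_keys respon
instance (event_keys : List (List (String × String))) (respon : List (List (String × List (List (String × String))))) (out : List (List (String × String))) : Decidable (Spec_check_event_key_py event_keys respon out) := by unfold Spec_check_event_key_py; infer_instance

-- ===== CLAIM (what is proved, stated in full; the proofs are below) =====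
def Claim_equal_check_event_key_py : Prop := ∀ (event_keys : List (List (String × String))) (respon : List (List (String × List (List (String × String))))), Dom_check_event_key_py event_keys respon → Pre_check_event_key_py event_keys respon → Spec_check_event_key_py event_keys respon (check_event_key_py event_keys respon)

-- ===== LEMMAS AND PROOFS =====

lemma pvSeenInEvents_eq_any (key : Option String) (events : List (List (String × String))) :
    pvSeenInEvents key events = events.any (fun event => (PySem.Dict.mk event).get? "eventKey" == key) := by
  induction events with
  | nil => rfl
  | cons e rest ih =>
    simp only [pvSeenInEvents, List.any_cons, ih]
    by_cases h : ({ items := e } : PySem.Dict String String).get? "eventKey" = key <;> simp [h]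

lemma pvSeen_eq_any (key : Option String) (respon : List (List (String × List (List (String × String))))) :
    pvSeen key respon = respon.any (fun day =>
      (((PySem.Dict.mk day).get? "events").getD []).any
        (fun event => (PySem.Dict.mk event).get? "eventKey" == key)) := by
  induction respon with
  | nil => rfl
  | cons d rest ih =>
    simp only [pvSeen, List.any_cons, ih, pvSeenInEvents_eq_any]
    split_ifs with h <;> simp [h]

-- Inner loop of A's set-building pass: membership after folding `add` over one day's events.
lemma mem_foldl_add_inner (events : List (List (String × String))) (s : PySem.Set (Option String)) (k : Option String) :
    k ∈ events.foldl (fun s event => PySem.Set.add s ((PySem.Dict.mk event).get? "eventKey")) s ↔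
      k ∈ s ∨ events.any (fun event => (PySem.Dict.mk event).get? "eventKey" == k) := by
  induction events generalizing s with
  | nil => simp
  | cons e rest ih =>
    rw [List.foldl_cons, ih, PySem.Set.mem_add]
    constructor
    · rintro ((h | h) | h)
      · exact Or.inl h
      · exact Or.inr (by simp [List.any_cons, h])
      · exact Or.inr (by simp [List.any_cons]; right; simpa using h)
    · rintro (h | h)
      · exact Or.inl (Or.inl h)
      · rcases (by simpa [List.any_cons] using h : ({ items := e } : PySem.Dict String String).get? "eventKey" = k ∨ _) with h2 | h2
        · exact Or.inl (Or.inr h2.symm)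
        · exact Or.inr (by simpa using h2)

-- Outer loop: membership in A's full isperformanced set ↔ B's direct scan condition.
lemma mem_foldl_add_outer (respon : List (List (String × List (List (String × String))))) (s : PySem.Set (Option String)) (k : Option String) :
    k ∈ respon.foldl (fun s day =>
        (((PySem.Dict.mk day).get? "events").getD []).foldl
          (fun s event => PySem.Set.add s ((PySem.Dict.mk event).get? "eventKey")) s) s ↔
      k ∈ s ∨ respon.any (fun day =>
        (((PySem.Dict.mk day).get? "events").getD []).any
          (fun event => (PySem.Dict.mk event).get? "eventKey" == k)) := by
  induction respon generalizing s with
  | nil => simp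
  | cons d rest ih =>
    simp [List.foldl_cons, ih, mem_foldl_add_inner]
    exact or_assoc

lemma pvMark_eq_map (respon : List (List (String × List (List (String × String))))) (event_keys : List (List (String × String))) :
    pvMark respon event_keys = event_keys.map (fun eve =>
      ((PySem.Dict.mk eve).insert "result"
        (if pvSeen ((PySem.Dict.mk eve).get? "event_key") respon then "是" else "否")).items) := by
  induction event_keys with
  | nil => rfl
  | cons e rest ih => simp [pvMark, ih]

-- ===== VERDICT (by name: the statement is the Claim_ definition above) =====
theorem check_event_key_py_spec : Claim_equal_check_event_key_py := by
  intro event_keys respon _ _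
  unfold Spec_check_event_key_py check_event_key_py check_event_key_py_alt
  rw [pvMark_eq_map]
  refine List.map_congr_left (fun eve _ => ?_)
  simp [PySem.Set.contains_eq_decide, mem_foldl_add_outer, PySem.Set.empty, pvSeen_eq_any]
  split_ifs <;> rfl
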